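-- pv_equiv track=rewrite | github.com/Al-Nator/Bachelor-thesis | scripts/aggregate.py | _find_protocol
-- ===== SOURCE A (Python) =====
-- PROTOCOLS = ("semantic_ood", "cross_domain", "in_domain", "lodo")
--
-- def _find_protocol(parts: list[str]) -> tuple[str, int]:
--     joined = "_".join(parts)
--     for protocol in PROTOCOLS:
--         marker = f"_{protocol}_"
--         idx = joined.find(marker)
--         if idx >= 0:
--             prefix = joined[:idx]
--             return protocol, len(f"{prefix}_{protocol}".split("_"))
--     return "unknown", 1
-- ===== SOURCE B (Python) =====
-- PROTOCOLS = ("semantic_ood", "cross_domain", "in_domain", "lodo")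
--
-- def _find_protocol(parts: list[str]) -> tuple[str, int]:
--     tokens = "_".join(parts).split("_")
--     for protocol in PROTOCOLS:
--         ptoks = protocol.split("_")
--         n = len(ptoks)
--         for i in range(1, len(tokens) - n):
--             if tokens[i:i + n] == ptoks:
--                 return protocol, i + n
--     return "unknown", 1
-- ===== Notes on version B (the rewrite author's own statement) =====
-- stated objective: alternative
-- what changed: B replaces A's per-protocol substring search (join, str.find of '_protocol_', then re-splitting the prefix to count tokens) by a single token-level algorithm: split the joined string into tokens once, then slide a window over the token list looking for the protocol's token sequence with a token before and after it, returning the window end index directly.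
import Mathlib
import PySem

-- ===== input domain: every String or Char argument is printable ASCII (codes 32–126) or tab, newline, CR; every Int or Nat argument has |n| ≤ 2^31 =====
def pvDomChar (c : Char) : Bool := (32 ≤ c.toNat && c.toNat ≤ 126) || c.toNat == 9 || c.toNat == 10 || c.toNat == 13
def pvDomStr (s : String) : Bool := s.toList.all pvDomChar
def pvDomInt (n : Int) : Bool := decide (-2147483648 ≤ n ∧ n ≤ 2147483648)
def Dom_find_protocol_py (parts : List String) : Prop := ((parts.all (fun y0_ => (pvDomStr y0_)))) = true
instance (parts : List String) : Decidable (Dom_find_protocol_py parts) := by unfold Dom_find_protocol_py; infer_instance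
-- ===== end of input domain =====

-- B replaces A's join + str.find('_protocol_') + re-split-the-prefix count by one split into
-- tokens followed by a token-window scan; same return value, a different decomposition.

def pvPROTOCOLS : List String := ["semantic_ood", "cross_domain", "in_domain", "lodo"]

-- ===== PORT A =====
-- the 'for protocol in PROTOCOLS' loop with its early return;
-- f"_{protocol}_" / f"{prefix}_{protocol}" are ported as String.ofList of the concatenated
-- character lists (exact: Python string concatenation); sep "_" ≠ "" so split? is always some.
def pvALoop (joined : String) : List String → String × Int
  | [] => ("unknown", 1)
  | protocol :: rest =>
    let marker := String.ofList ('_' :: protocol.toList ++ ['_'])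
    let idx := PySem.Str.find joined marker
    if 0 ≤ idx then
      let pfx := PySem.Str.slice joined none (some idx)
      (protocol,
        (((PySem.Str.split? (String.ofList (pfx.toList ++ '_' :: protocol.toList)) "_").getD []).length : Int))
    else pvALoop joined rest

def find_protocol_py (parts : List String) : String × Int :=
  pvALoop (PySem.Str.join "_" parts) pvPROTOCOLS

-- ===== PORT B =====
-- 'for i in range(1, len(tokens) - n): if tokens[i:i+n] == ptoks: return protocol, i + n'
def pvBScan (tokens ptoks : List String) : List Int → Option Int
  | [] => none
  | i :: is =>
    if PySem.List.slice tokens (some i) (some (i + (ptoks.length : Int))) = ptoks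
    then some (i + (ptoks.length : Int)) else pvBScan tokens ptoks is

def pvBLoop (tokens : List String) : List String → String × Int
  | [] => ("unknown", 1)
  | protocol :: rest =>
    let ptoks := (PySem.Str.split? protocol "_").getD []
    match pvBScan tokens ptoks
        (PySem.List.pyRange 1 ((tokens.length : Int) - (ptoks.length : Int)) 1) with
    | some r => (protocol, r)
    | none => pvBLoop tokens rest

def find_protocol_py_alt (parts : List String) : String × Int :=
  pvBLoop ((PySem.Str.split? (PySem.Str.join "_" parts) "_").getD []) pvPROTOCOLS

-- ===== PRECONDITION & SPEC =====
def Spec_find_protocol_py (parts : List String) (out : String × Int) : Prop := out = find_protocol_py_alt parts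
instance (parts : List String) (out : String × Int) : Decidable (Spec_find_protocol_py parts out) := by unfold Spec_find_protocol_py; infer_instance

-- ===== CLAIM (what is proved, stated in full; the proofs are below) =====
def Claim_equal_find_protocol_py : Prop := ∀ (parts : List String), Dom_find_protocol_py parts → Spec_find_protocol_py parts (find_protocol_py parts)

-- ===== LEMMAS AND PROOFS =====

-- reference splitter for splitOn on the one-character separator '_'
def pvAux : List Char → List Char → List (List Char)
  | [], cur => [cur.reverse]
  | c :: rest, cur => if c = '_' then cur.reverse :: pvAux rest [] else pvAux rest (c :: cur)

def pvJ (ts : List (List Char)) : List Char := PySem.Chars.join ['_'] ts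

theorem pvAux_ne_nil (l cur : List Char) : pvAux l cur ≠ [] := by
  induction l generalizing cur with
  | nil => simp [pvAux]
  | cons c rest ih => by_cases h : c = '_' <;> simp [pvAux, h, ih]

theorem pvJ_cons (t : List Char) (xs : List (List Char)) (h : xs ≠ []) :
    pvJ (t :: xs) = t ++ '_' :: pvJ xs := by
  cases xs with
  | nil => exact absurd rfl h
  | cons y ys => simp [pvJ, PySem.Chars.join_cons_cons]

theorem pvAux_join (l cur : List Char) : pvJ (pvAux l cur) = cur.reverse ++ l := by
  induction l generalizing cur with
  | nil => simp [pvAux, pvJ, PySem.Chars.join_singleton]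
  | cons c rest ih =>
    by_cases h : c = '_'
    · subst h
      rw [show pvAux ('_' :: rest) cur = cur.reverse :: pvAux rest [] by simp [pvAux],
        pvJ_cons _ _ (pvAux_ne_nil _ _), ih]
      simp
    · rw [show pvAux (c :: rest) cur = pvAux rest (c :: cur) by simp [pvAux, h], ih]
      simp

theorem pvAux_free (l cur : List Char) (hc : '_' ∉ cur) :
    ∀ t ∈ pvAux l cur, '_' ∉ t := by
  induction l generalizing cur with
  | nil =>
    intro t ht; simp [pvAux] at ht; subst ht; simpa using hc
  | cons c rest ih =>
    intro t ht
    by_cases h : c = '_'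
    · subst h; simp [pvAux] at ht
      rcases ht with ht | ht
      · subst ht; simpa using hc
      · exact ih [] (by simp) t ht
    · rw [show pvAux (c :: rest) cur = pvAux rest (c :: cur) by simp [pvAux, h]] at ht
      exact ih (c :: cur) (by simp [hc, Ne.symm h]) t ht

theorem pvGo_eq (fuel : Nat) (l cur : List Char) (acc : List (List Char)) (h : l.length ≤ fuel) :
    PySem.Chars.splitOn.go ['_'] fuel l cur acc = acc.reverse ++ pvAux l cur := by
  induction fuel generalizing l cur acc with
  | zero =>
    have : l = [] := List.eq_nil_of_length_eq_zero (Nat.le_zero.mp h)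
    subst this
    simp [PySem.Chars.splitOn.go, pvAux]
  | succ n ih =>
    cases l with
    | nil => simp [PySem.Chars.splitOn.go, pvAux]
    | cons c rest =>
      by_cases hc : c = '_'
      · subst hc
        have hpre : List.isPrefixOf ['_'] ('_' :: rest) = true := by simp [List.isPrefixOf]
        rw [show PySem.Chars.splitOn.go ['_'] (n+1) ('_' :: rest) cur acc
              = PySem.Chars.splitOn.go ['_'] n (List.drop 1 ('_' :: rest)) [] (cur.reverse :: acc) by
            simp [PySem.Chars.splitOn.go, hpre]]
        rw [List.drop_one, List.tail_cons,
          ih rest [] (cur.reverse :: acc) (by simpa using Nat.le_of_succ_le_succ h)]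
        simp [pvAux]
      · have hpre : List.isPrefixOf ['_'] (c :: rest) = false := by
          simp [List.isPrefixOf]; exact fun hh => absurd hh.symm hc
        rw [show PySem.Chars.splitOn.go ['_'] (n+1) (c :: rest) cur acc
              = PySem.Chars.splitOn.go ['_'] n rest (c :: cur) acc by
            simp [PySem.Chars.splitOn.go, hpre]]
        rw [ih rest (c :: cur) acc (by simpa using Nat.le_of_succ_le_succ h)]
        simp [pvAux, hc]

theorem pvSplitOn_eq (s : List Char) : PySem.Chars.splitOn s ['_'] = pvAux s [] := by
  rw [show PySem.Chars.splitOn s ['_'] = PySem.Chars.splitOn.go ['_'] (s.length + 1) s [] [] from rfl,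
    pvGo_eq _ _ _ _ (by omega)]
  simp

theorem pvJ_append (xs ys : List (List Char)) (hx : xs ≠ []) (hy : ys ≠ []) :
    pvJ (xs ++ ys) = pvJ xs ++ '_' :: pvJ ys := by
  induction xs with
  | nil => exact absurd rfl hx
  | cons x xs ih =>
    cases xs with
    | nil =>
      rw [List.singleton_append, pvJ_cons _ _ hy]
      simp [pvJ, PySem.Chars.join_singleton]
    | cons x2 xs2 =>
      rw [List.cons_append, pvJ_cons _ _ (by simp), pvJ_cons _ _ (by simp), ih (by simp)]
      simp

theorem pvJoinsplit (ts : List (List Char)) (i : Nat) (h0 : 0 < i) (h1 : i < ts.length) :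
    pvJ ts = pvJ (ts.take i) ++ '_' :: pvJ (ts.drop i) := by
  conv_lhs => rw [← List.take_append_drop i ts]
  have h2 : (ts.take i).length = i := by rw [List.length_take]; omega
  have h3 : (ts.drop i).length = ts.length - i := by rw [List.length_drop]
  refine pvJ_append _ _ (fun hnil => ?_) (fun hnil => ?_)
  · rw [hnil] at h2; simp at h2; omega
  · rw [hnil] at h3; simp at h3; omega

theorem pvAux_single (t cur : List Char) (h : '_' ∉ t) : pvAux t cur = [cur.reverse ++ t] := by
  induction t generalizing cur with
  | nil => simp [pvAux]
  | cons c rest ih =>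
    have hc : ¬ c = '_' := fun hh => h (hh ▸ List.mem_cons_self ..)
    rw [show pvAux (c :: rest) cur = pvAux rest (c :: cur) by simp [pvAux, hc],
      ih (c :: cur) (fun hm => h (List.mem_cons_of_mem _ hm))]
    simp

theorem pvAux_sep (t l cur : List Char) (h : '_' ∉ t) :
    pvAux (t ++ '_' :: l) cur = (cur.reverse ++ t) :: pvAux l [] := by
  induction t generalizing cur with
  | nil => simp [pvAux]
  | cons c rest ih =>
    have hc : ¬ c = '_' := fun hh => h (hh ▸ List.mem_cons_self ..)
    rw [List.cons_append,
      show pvAux (c :: (rest ++ '_' :: l)) cur = pvAux (rest ++ '_' :: l) (c :: cur) by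
        simp [pvAux, hc],
      ih (c :: cur) (fun hm => h (List.mem_cons_of_mem _ hm))]
    simp

theorem pvAux_pvJ (ws : List (List Char)) (hne : ws ≠ []) (hf : ∀ t ∈ ws, '_' ∉ t) :
    pvAux (pvJ ws) [] = ws := by
  induction ws with
  | nil => exact absurd rfl hne
  | cons w ws ih =>
    cases ws with
    | nil =>
      rw [show pvJ [w] = w by simp [pvJ, PySem.Chars.join_singleton]]
      simpa using pvAux_single w [] (hf w (by simp))
    | cons w2 ws2 =>
      rw [pvJ_cons _ _ (by simp), pvAux_sep _ _ _ (hf w (by simp)),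
        ih (by simp) (fun t ht => hf t (List.mem_cons_of_mem _ ht))]
      simp

theorem pvAlign (a b x y : List Char) (ha : '_' ∉ a) (hb : '_' ∉ b) :
    (a ++ '_' :: x) <+: (b ++ '_' :: y) ↔ a = b ∧ x <+: y := by
  induction a generalizing b with
  | nil =>
    cases b with
    | nil => simp
    | cons c bs =>
      simp only [List.nil_append]
      constructor
      · rintro ⟨t, ht⟩
        rw [List.cons_append] at ht
        have : '_' = c := by exact (List.cons_eq_cons.mp ht.symm).1.symm
        exact absurd (this ▸ List.mem_cons_self ..) hb
      · rintro ⟨h, -⟩; exact absurd h.symm (by simp)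
  | cons c as ih =>
    cases b with
    | nil =>
      simp only [List.nil_append]
      constructor
      · rintro ⟨t, ht⟩
        rw [List.cons_append] at ht
        have : c = '_' := (List.cons_eq_cons.mp ht).1
        exact absurd (this ▸ List.mem_cons_self ..) ha
      · rintro ⟨h, -⟩; exact absurd h (by simp)
    | cons d bs =>
      simp only [List.cons_append, List.cons_prefix_cons]
      rw [ih bs (fun hm => ha (List.mem_cons_of_mem _ hm)) (fun hm => hb (List.mem_cons_of_mem _ hm))]
      constructor
      · rintro ⟨h1, h2, h3⟩; exact ⟨by rw [h1, h2], h3⟩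
      · rintro ⟨h1, h3⟩
        obtain ⟨h1a, h1b⟩ := List.cons_eq_cons.mp h1
        exact ⟨h1a, h1b, h3⟩

theorem pvMatch (pt rest : List (List Char)) (hpt : pt ≠ [])
    (hf : ∀ t ∈ pt, '_' ∉ t) (hr : ∀ t ∈ rest, '_' ∉ t) :
    ((pvJ pt ++ ['_']) <+: pvJ rest ↔ rest.take pt.length = pt ∧ pt.length < rest.length) := by
  induction pt generalizing rest with
  | nil => exact absurd rfl hpt
  | cons p0 ptl ih =>
    cases rest with
    | nil =>
      rw [show pvJ ([] : List (List Char)) = [] from PySem.Chars.join_nil _]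
      constructor
      · intro h
        have := List.prefix_nil.mp h
        simp at this
      · rintro ⟨h1, h2⟩; simp at h2
    | cons r rest2 =>
      cases rest2 with
      | nil =>
        rw [show pvJ [r] = r from PySem.Chars.join_singleton _ _]
        constructor
        · intro h
          have hm : '_' ∈ r := h.sublist.subset (by simp)
          exact absurd hm (hr r (by simp))
        · rintro ⟨h1, h2⟩
          simp at h2
      | cons r2 rest3 =>
        rw [pvJ_cons r (r2 :: rest3) (by simp)]
        cases ptl with
        | nil =>
          rw [show pvJ [p0] = p0 from PySem.Chars.join_singleton _ _]
          rw [show p0 ++ ['_'] = p0 ++ '_' :: [] from rfl]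
          rw [pvAlign p0 r [] (pvJ (r2 :: rest3)) (hf p0 (by simp)) (hr r (by simp))]
          constructor
          · rintro ⟨h1, -⟩
            subst h1
            refine ⟨by simp, by simp⟩
          · rintro ⟨h1, -⟩
            simp at h1
            exact ⟨h1.symm, List.nil_prefix⟩
        | cons p1 ptl2 =>
          rw [pvJ_cons p0 (p1 :: ptl2) (by simp), List.append_assoc, List.cons_append,
            pvAlign p0 r (pvJ (p1 :: ptl2) ++ ['_']) (pvJ (r2 :: rest3))
              (hf p0 (by simp)) (hr r (by simp)),
            ih (r2 :: rest3) (by simp) (fun t ht => hf t (List.mem_cons_of_mem _ ht))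
              (fun t ht => hr t (List.mem_cons_of_mem _ ht))]
          constructor
          · rintro ⟨h1, h2, h3⟩
            subst h1
            refine ⟨?_, by simp at h3 ⊢; omega⟩
            simp only [List.length_cons, List.take_succ_cons] at h2 ⊢
            rw [h2]
          · rintro ⟨h1, h2⟩
            simp only [List.length_cons, List.take_succ_cons] at h1
            obtain ⟨h1a, h1b⟩ := List.cons_eq_cons.mp h1
            exact ⟨h1a.symm, h1b, by simp at h2 ⊢; omega⟩

def pvPos (ts : List (List Char)) (i : Nat) : Nat := (pvJ (ts.take i)).length

theorem pvTake_ne_nil (ts : List (List Char)) (i : Nat) (h0 : 0 < i) (h1 : i ≤ ts.length) :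
    ts.take i ≠ [] := by
  intro hnil
  have h2 := congrArg List.length hnil
  rw [List.length_take, List.length_nil] at h2
  omega

theorem pvOcc_of (ts pt : List (List Char)) (i : Nat) (hpt0 : 0 < pt.length)
    (hi1 : 1 ≤ i) (hib : i + pt.length < ts.length)
    (hw : (ts.drop i).take pt.length = pt)
    (hfts : ∀ t ∈ ts, '_' ∉ t) (hfpt : ∀ t ∈ pt, '_' ∉ t) :
    ('_' :: (pvJ pt ++ ['_'])) <+: (pvJ ts).drop (pvPos ts i) := by
  rw [pvJoinsplit ts i (by omega) (by omega)]
  rw [show pvPos ts i = (pvJ (ts.take i)).length from rfl, List.drop_left]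
  rw [List.cons_prefix_cons]
  refine ⟨rfl, ?_⟩
  rw [pvMatch pt (ts.drop i) (by intro h; rw [h] at hpt0; simp at hpt0)
    hfpt (fun t ht => hfts t (List.mem_of_mem_drop ht))]
  refine ⟨hw, ?_⟩
  rw [List.length_drop]
  omega

theorem pvOcc_to (ts pt : List (List Char)) (j : Nat) (hpt0 : 0 < pt.length)
    (hfts : ∀ t ∈ ts, '_' ∉ t) (hfpt : ∀ t ∈ pt, '_' ∉ t)
    (h : ('_' :: (pvJ pt ++ ['_'])) <+: (pvJ ts).drop j) :
    ∃ i, 1 ≤ i ∧ i + pt.length < ts.length ∧ (ts.drop i).take pt.length = pt ∧ j = pvPos ts i := by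
  induction ts generalizing j with
  | nil =>
    rw [show pvJ ([] : List (List Char)) = [] from PySem.Chars.join_nil _] at h
    simp only [List.drop_nil] at h
    have := List.prefix_nil.mp h
    simp at this
  | cons t rest ih =>
    cases rest with
    | nil =>
      rw [show pvJ [t] = t from PySem.Chars.join_singleton _ _] at h
      have hm : '_' ∈ t := List.mem_of_mem_drop (h.sublist.subset (by simp))
      exact absurd hm (hfts t (by simp))
    | cons r rest2 =>
      rw [pvJ_cons t (r :: rest2) (by simp)] at h
      rcases Nat.lt_trichotomy j t.length with hj | hj | hj
      · -- j inside the first token: contradiction, its characters are not '_'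
        rw [List.drop_append_of_le_length (by omega)] at h
        obtain ⟨c, cs, hdrop⟩ : ∃ c cs, t.drop j = c :: cs := by
          cases hdrop : t.drop j with
          | nil =>
            have := congrArg List.length hdrop
            rw [List.length_drop] at this
            simp at this
            omega
          | cons c cs => exact ⟨c, cs, rfl⟩
        rw [hdrop, List.cons_append, List.cons_prefix_cons] at h
        have hm : '_' ∈ t := List.mem_of_mem_drop (by rw [hdrop, ← h.1]; simp)
        exact absurd hm (hfts t (by simp))
      · -- j at the separator after the first token
        subst hj
        rw [List.drop_left] at h
        rw [List.cons_prefix_cons] at h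
        rw [pvMatch pt (r :: rest2) (by intro hh; rw [hh] at hpt0; simp at hpt0) hfpt
          (fun x hx => hfts x (List.mem_cons_of_mem _ hx))] at h
        have hlt := h.2.2
        simp only [List.length_cons] at hlt ⊢
        refine ⟨1, le_refl 1, by omega, by simpa using h.2.1, ?_⟩
        rw [show pvPos (t :: r :: rest2) 1 = (pvJ [t]).length from rfl,
          show pvJ [t] = t from PySem.Chars.join_singleton _ _]
      · -- j beyond the first token: recurse
        have hdrop : (t ++ '_' :: pvJ (r :: rest2)).drop j
            = (pvJ (r :: rest2)).drop (j - t.length - 1) := by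
          rw [List.drop_append, List.drop_eq_nil_of_le (by omega), List.nil_append,
            show j - t.length = (j - t.length - 1) + 1 by omega, List.drop_succ_cons]
          rw [show j - t.length - 1 + 1 - 1 = j - t.length - 1 by omega]
        rw [hdrop] at h
        obtain ⟨i', hi1, hib, hw, hj'⟩ := ih (j - t.length - 1)
          (fun x hx => hfts x (List.mem_cons_of_mem _ hx)) h
        refine ⟨i' + 1, by omega, by simp at hib ⊢; omega, by simpa using hw, ?_⟩
        have htk : (r :: rest2).take i' ≠ [] := by
          refine pvTake_ne_nil _ _ (by omega) (by simp at hib ⊢; omega)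
        rw [show pvPos (t :: r :: rest2) (i' + 1)
            = (pvJ (t :: (r :: rest2).take i')).length from rfl,
          pvJ_cons t _ htk]
        rw [show pvPos (r :: rest2) i' = (pvJ ((r :: rest2).take i')).length from rfl] at hj'
        simp
        omega

theorem pvMono (ts : List (List Char)) (i i' : Nat) (h0 : 0 < i) (h : i < i') (h1 : i' ≤ ts.length) :
    pvPos ts i < pvPos ts i' := by
  have hlen : (ts.take i').length = i' := by rw [List.length_take]; omega
  have hsplit := pvJoinsplit (ts.take i') i (by omega) (by omega)
  rw [List.take_take, min_eq_left (by omega)] at hsplit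
  unfold pvPos
  rw [hsplit]
  simp

def pvValid (tks pts : List String) (i : Nat) : Prop :=
  1 ≤ i ∧ i + pts.length < tks.length ∧ (tks.drop i).take pts.length = pts

theorem pvScan_none (tks pts : List String) (a : Int) (ha : 1 ≤ a)
    (h : ∀ i : Nat, a ≤ (i : Int) → ¬ pvValid tks pts i) :
    pvBScan tks pts (PySem.List.pyRange a ((tks.length : Int) - (pts.length : Int)) 1) = none := by
  by_cases hab : (tks.length : Int) - (pts.length : Int) ≤ a
  · have hlen : (PySem.List.pyRange a ((tks.length : Int) - (pts.length : Int)) 1).length = 0 := by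
      rw [PySem.List.length_pyRange_one]; omega
    rw [List.eq_nil_of_length_eq_zero hlen]
    rfl
  · push Not at hab
    rw [PySem.List.pyRange_one_cons hab]
    have h0a : (0 : Int) ≤ a := by omega
    have hcast : ((a.toNat : Int)) = a := Int.toNat_of_nonneg h0a
    show (if PySem.List.slice tks (some a) (some (a + (pts.length : Int))) = pts
        then some (a + (pts.length : Int)) else pvBScan tks pts
          (PySem.List.pyRange (a + 1) ((tks.length : Int) - (pts.length : Int)) 1)) = none
    rw [if_neg ?hneg]
    case hneg =>
      intro heq
      rw [PySem.List.slice_toNat tks h0a (by omega)] at heq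
      refine h a.toNat (by omega) ⟨by omega, by omega, ?_⟩
      rw [show (a + (pts.length : Int)).toNat - a.toNat = pts.length by omega] at heq
      exact heq
    have := pvScan_none tks pts (a + 1) (by omega) (fun i hi hv => h i (by omega) hv)
    exact this
termination_by ((tks.length : Int) - (pts.length : Int) - a).toNat
decreasing_by omega

theorem pvScan_some (tks pts : List String) (a : Int) (i0 : Nat) (ha : 1 ≤ a)
    (hai : a ≤ (i0 : Int)) (hv : pvValid tks pts i0)
    (hmin : ∀ i : Nat, a ≤ (i : Int) → pvValid tks pts i → i0 ≤ i) :
    pvBScan tks pts (PySem.List.pyRange a ((tks.length : Int) - (pts.length : Int)) 1)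
      = some ((i0 : Int) + (pts.length : Int)) := by
  have hab : a < (tks.length : Int) - (pts.length : Int) := by
    obtain ⟨h1, h2, h3⟩ := hv
    omega
  rw [PySem.List.pyRange_one_cons hab]
  have h0a : (0 : Int) ≤ a := by omega
  show (if PySem.List.slice tks (some a) (some (a + (pts.length : Int))) = pts
      then some (a + (pts.length : Int)) else pvBScan tks pts
        (PySem.List.pyRange (a + 1) ((tks.length : Int) - (pts.length : Int)) 1)) = some ((i0 : Int) + (pts.length : Int))
  by_cases heq : PySem.List.slice tks (some a) (some (a + (pts.length : Int))) = pts
  · rw [if_pos heq]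
    have hva : pvValid tks pts a.toNat := by
      rw [PySem.List.slice_toNat tks h0a (by omega),
        show (a + (pts.length : Int)).toNat - a.toNat = pts.length by omega] at heq
      exact ⟨by omega, by omega, heq⟩
    have h1 : i0 ≤ a.toNat := hmin a.toNat (by omega) hva
    have h2 : ((i0 : Int)) = a := by omega
    rw [h2]
  · rw [if_neg heq]
    have hne : a.toNat ≠ i0 := by
      intro hh
      apply heq
      obtain ⟨-, hb, hw⟩ := hv
      rw [PySem.List.slice_toNat tks h0a (by omega),
        show (a + (pts.length : Int)).toNat - a.toNat = pts.length by omega, hh]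
      exact hw
    exact pvScan_some tks pts (a + 1) i0 (by omega) (by omega) hv
      (fun i hi hvi => hmin i (by omega) hvi)
termination_by ((tks.length : Int) - (pts.length : Int) - a).toNat
decreasing_by omega

theorem pvNatLeast {P : Nat → Prop} (h : ∃ n, P n) : ∃ n, P n ∧ ∀ m, P m → n ≤ m := by
  obtain ⟨n, hn⟩ := h
  induction n using Nat.strong_induction_on with
  | _ n ih =>
    by_cases hlow : ∃ m, m < n ∧ P m
    · obtain ⟨m, hm, hPm⟩ := hlow; exact ih m hm hPm
    · push Not at hlow
      exact ⟨n, hn, fun m hPm => by by_contra hc; exact absurd hPm (hlow m (by omega))⟩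

theorem pvTokens_eq (s : String) :
    (PySem.Str.split? s "_").getD [] = (pvAux s.toList []).map String.ofList := by
  rw [PySem.Str.split?.eq_1,
    show ("_" : String).toList = ['_'] from rfl,
    show PySem.Chars.split? s.toList ['_'] = some (PySem.Chars.splitOn s.toList ['_']) by
      simp [PySem.Chars.split?],
    pvSplitOn_eq]
  rfl

theorem pvOfList_inj : Function.Injective String.ofList := by
  intro a b h
  have := congrArg String.toList h
  rwa [String.toList_ofList, String.toList_ofList] at this

theorem pvLoop_eq (ps : List String) (s : String) :
    pvALoop s ps = pvBLoop ((PySem.Str.split? s "_").getD []) ps := by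
  induction ps with
  | nil => rfl
  | cons p rest ih =>
    have htok := pvTokens_eq s
    have hptok := pvTokens_eq p
    set ts := pvAux s.toList [] with hts
    set pt := pvAux p.toList [] with hptdef
    have hts_ne : ts ≠ [] := pvAux_ne_nil _ _
    have hpt_ne : pt ≠ [] := pvAux_ne_nil _ _
    have hpt0 : 0 < pt.length := by
      cases hc : pt with
      | nil => exact absurd hc hpt_ne
      | cons x xs => simp
    have hts_free : ∀ t ∈ ts, '_' ∉ t := pvAux_free _ _ (by simp)
    have hpt_free : ∀ t ∈ pt, '_' ∉ t := pvAux_free _ _ (by simp)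
    have hJts : pvJ ts = s.toList := by
      rw [hts]; simpa using pvAux_join s.toList []
    have hJpt : pvJ pt = p.toList := by
      rw [hptdef]; simpa using pvAux_join p.toList []
    have hlen_pt : ((PySem.Str.split? p "_").getD []).length = pt.length := by
      rw [hptok, List.length_map]
    have hvalid_iff : ∀ i : Nat,
        pvValid ((PySem.Str.split? s "_").getD []) ((PySem.Str.split? p "_").getD []) i ↔
          (1 ≤ i ∧ i + pt.length < ts.length ∧ (ts.drop i).take pt.length = pt) := by
      intro i
      unfold pvValid
      rw [htok, hptok, List.length_map, List.length_map]
      have hwin : ((ts.map String.ofList).drop i).take pt.length = pt.map String.ofList ↔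
          (ts.drop i).take pt.length = pt := by
        rw [← List.map_drop, ← List.map_take]
        exact ⟨fun h => List.map_injective_iff.mpr pvOfList_inj h, fun h => by rw [h]⟩
      rw [hwin]
    have hA : pvALoop s (p :: rest) =
        (if 0 ≤ PySem.Str.find s (String.ofList ('_' :: p.toList ++ ['_'])) then
          (p, (((PySem.Str.split? (String.ofList ((PySem.Str.slice s none
              (some (PySem.Str.find s (String.ofList ('_' :: p.toList ++ ['_']))))).toList
              ++ '_' :: p.toList)) "_").getD []).length : Int))
        else pvALoop s rest) := rfl
    have hB : pvBLoop ((PySem.Str.split? s "_").getD []) (p :: rest) =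
        (match pvBScan ((PySem.Str.split? s "_").getD []) ((PySem.Str.split? p "_").getD [])
            (PySem.List.pyRange 1 (((((PySem.Str.split? s "_").getD []).length : Int))
              - (((PySem.Str.split? p "_").getD []).length : Int)) 1) with
        | some r => (p, r)
        | none => pvBLoop ((PySem.Str.split? s "_").getD []) rest) := rfl
    rw [hA, hB]
    by_cases hex : ∃ i, pvValid ((PySem.Str.split? s "_").getD []) ((PySem.Str.split? p "_").getD []) i
    · -- a protocol window exists: both sides return (p, i0 + n) for the least window i0
      obtain ⟨i0, hv0, hmin⟩ := pvNatLeast hex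
      obtain ⟨hi1, hib, hw⟩ := (hvalid_iff i0).mp hv0
      have hocc := pvOcc_of ts pt i0 hpt0 hi1 hib hw hts_free hpt_free
      have hi0len : i0 < ts.length := by omega
      have hinf : ('_' :: (pvJ pt ++ ['_'])) <:+: pvJ ts :=
        (PySem.Chars.isIn_iff_infix _ _).mp
          ((PySem.Chars.exists_prefix_drop_iff_isIn _ _).mp ⟨_, hocc⟩)
      have hfind0 : 0 ≤ PySem.Chars.find (pvJ ts) ('_' :: (pvJ pt ++ ['_'])) :=
        (PySem.Chars.find_nonneg_iff _ _).mpr hinf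
      obtain ⟨hpre, hminj⟩ := PySem.Chars.find_spec hfind0
      obtain ⟨i1, hi11, hib1, hw1, hj1⟩ := pvOcc_to ts pt
        (PySem.Chars.find (pvJ ts) ('_' :: (pvJ pt ++ ['_']))).toNat hpt0 hts_free hpt_free hpre
      have h10 : i0 ≤ i1 := hmin i1 ((hvalid_iff i1).mpr ⟨hi11, hib1, hw1⟩)
      have hposge : ¬ (pvPos ts i0 <
          (PySem.Chars.find (pvJ ts) ('_' :: (pvJ pt ++ ['_']))).toNat) :=
        fun hlt => hminj _ hlt hocc
      have heqi : i1 = i0 := by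
        by_contra hne
        have hlt : i0 < i1 := by omega
        have := pvMono ts i0 i1 (by omega) hlt (by omega)
        omega
      have hidx : (PySem.Chars.find (pvJ ts) ('_' :: (pvJ pt ++ ['_']))).toNat = pvPos ts i0 := by
        rw [hj1, heqi]
      have hfindS : PySem.Str.find s (String.ofList ('_' :: p.toList ++ ['_']))
          = PySem.Chars.find (pvJ ts) ('_' :: (pvJ pt ++ ['_'])) := by
        rw [PySem.Str.find_eq, String.toList_ofList, hJts, hJpt, List.cons_append]
      -- the A-side prefix is the join of the first i0 tokens
      have htake : s.toList.take
          (PySem.Chars.find (pvJ ts) ('_' :: (pvJ pt ++ ['_']))).toNat = pvJ (ts.take i0) := by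
        rw [hidx, ← hJts, show pvPos ts i0 = (pvJ (ts.take i0)).length from rfl,
          pvJoinsplit ts i0 (by omega) hi0len, List.take_left]
      have htakene : ts.take i0 ≠ [] := pvTake_ne_nil ts i0 (by omega) (by omega)
      have hpfx : (PySem.Str.slice s none
          (some (PySem.Str.find s (String.ofList ('_' :: p.toList ++ ['_']))))).toList
          = pvJ (ts.take i0) := by
        rw [PySem.Str.toList_slice, PySem.Chars.slice_eq_listSlice, hfindS,
          PySem.List.slice_to _ hfind0, htake]
      have harg : (PySem.Str.slice s none
          (some (PySem.Str.find s (String.ofList ('_' :: p.toList ++ ['_']))))).toList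
          ++ '_' :: p.toList = pvJ (ts.take i0 ++ pt) := by
        rw [hpfx, ← hJpt, ← pvJ_append _ _ htakene hpt_ne]
      have hpieces : ((PySem.Str.split? (String.ofList ((PySem.Str.slice s none
          (some (PySem.Str.find s (String.ofList ('_' :: p.toList ++ ['_']))))).toList
          ++ '_' :: p.toList)) "_").getD []).length = i0 + pt.length := by
        rw [pvTokens_eq, String.toList_ofList, harg,
          pvAux_pvJ (ts.take i0 ++ pt) (by simp [hpt_ne])
            (fun t ht => by
              rcases List.mem_append.mp ht with h | h
              · exact hts_free t (List.mem_of_mem_take h)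
              · exact hpt_free t h),
          List.length_map, List.length_append, List.length_take]
        omega
      have hscan := pvScan_some ((PySem.Str.split? s "_").getD [])
        ((PySem.Str.split? p "_").getD []) 1 i0 (le_refl 1) (by exact_mod_cast hi1)
        hv0 (fun i _ hvi => hmin i hvi)
      rw [hscan, if_pos (by rw [hfindS]; exact hfind0), hpieces, hlen_pt]
      push_cast
      rfl
    · -- no window: A's find misses, B's scan misses, both recurse
      have hfind : PySem.Str.find s (String.ofList ('_' :: p.toList ++ ['_'])) = -1 := by
        rw [PySem.Str.find_eq, String.toList_ofList, PySem.Chars.find_eq_neg_one_iff]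
        intro hinf
        obtain ⟨j, hj⟩ := (PySem.Chars.exists_prefix_drop_iff_isIn _ _).mpr
          ((PySem.Chars.isIn_iff_infix _ _).mpr hinf)
        rw [← hJts] at hj
        rw [show '_' :: p.toList ++ ['_'] = '_' :: (pvJ pt ++ ['_']) by
          rw [hJpt, List.cons_append]] at hj
        obtain ⟨i, hi1, hib, hw, -⟩ := pvOcc_to ts pt j hpt0 hts_free hpt_free hj
        exact hex ⟨i, (hvalid_iff i).mpr ⟨hi1, hib, hw⟩⟩
      have hscan := pvScan_none ((PySem.Str.split? s "_").getD [])
        ((PySem.Str.split? p "_").getD []) 1 (le_refl 1)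
        (fun i _ hvi => hex ⟨i, hvi⟩)
      rw [hscan, hfind, if_neg (by norm_num), ih]

-- ===== VERDICT (by name: the statement is the Claim_ definition above) =====
theorem find_protocol_py_spec : Claim_equal_find_protocol_py := by
  intro parts _
  unfold Spec_find_protocol_py find_protocol_py find_protocol_py_alt
  exact pvLoop_eq pvPROTOCOLS (PySem.Str.join "_" parts)
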